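-- pv_equiv track=rewrite | github.com/Lily-j17-source/RetosPython | ejercicio2.py | devuelve_lista
-- ===== SOURCE A (Python) =====
-- def devuelve_lista(numero1, longitud):
--     if(isinstance(numero1,int)):
--         if(isinstance(longitud,int)):
--             listaMultiplos =[]
--             multiplo=numero1
--             for i in range(longitud):
--                 multiplo += numero1 * i
--                 listaMultiplos.append(multiplo)
--             return listaMultiplos
-- ===== SOURCE B (Python) =====
-- def devuelve_lista(numero1, longitud):
--     if isinstance(numero1, int):
--         if isinstance(longitud, int):
--             return [numero1 * (1 + i * (i + 1) // 2) for i in range(longitud)]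
-- ===== Notes on version B (the rewrite author's own statement) =====
-- stated objective: simpler
-- what changed: Replaces the running accumulator loop (multiplo += numero1*i; append) by a stateless list comprehension computing each element independently with the closed form numero1*(1 + i*(i+1)//2).
import Mathlib
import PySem

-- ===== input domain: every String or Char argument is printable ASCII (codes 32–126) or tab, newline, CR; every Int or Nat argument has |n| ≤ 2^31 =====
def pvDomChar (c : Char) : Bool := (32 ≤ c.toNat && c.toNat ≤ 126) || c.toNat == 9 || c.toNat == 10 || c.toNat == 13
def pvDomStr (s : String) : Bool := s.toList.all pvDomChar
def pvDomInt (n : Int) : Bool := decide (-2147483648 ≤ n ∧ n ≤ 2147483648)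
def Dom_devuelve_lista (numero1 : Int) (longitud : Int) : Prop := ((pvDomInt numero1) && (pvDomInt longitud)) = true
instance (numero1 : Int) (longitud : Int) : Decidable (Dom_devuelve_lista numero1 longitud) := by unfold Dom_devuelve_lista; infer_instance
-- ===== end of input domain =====

-- B replaces A's running-accumulator loop by a stateless closed-form per index; objective: simpler.
-- ===== PORT A =====
-- In Lean both arguments are Int, so Python's two isinstance(..., int) guards always hold.
def devuelve_lista (numero1 : Int) (longitud : Int) : List Int :=
  ((PySem.List.pyRange 0 longitud 1).foldl
    (fun (st : Int × List Int) i =>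
      let multiplo := st.1 + numero1 * i
      (multiplo, st.2 ++ [multiplo]))
    (numero1, [])).2

-- ===== PORT B =====
def devuelve_lista_alt (numero1 : Int) (longitud : Int) : List Int :=
  (PySem.List.pyRange 0 longitud 1).map
    (fun i => numero1 * (1 + PySem.Int.floordiv (i * (i + 1)) 2))

-- ===== PRECONDITION & SPEC =====
def Spec_devuelve_lista (numero1 : Int) (longitud : Int) (out : List Int) : Prop := out = devuelve_lista_alt numero1 longitud
instance (numero1 : Int) (longitud : Int) (out : List Int) : Decidable (Spec_devuelve_lista numero1 longitud out) := by unfold Spec_devuelve_lista; infer_instance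

-- ===== CLAIM (what is proved, stated in full; the proofs are below) =====
def Claim_equal_devuelve_lista : Prop := ∀ (numero1 : Int) (longitud : Int), Dom_devuelve_lista numero1 longitud → Spec_devuelve_lista numero1 longitud (devuelve_lista numero1 longitud)

-- ===== LEMMAS AND PROOFS =====

lemma devuelve_tri (m : Nat) : m * (m - 1) / 2 + m = (m + 1) * m / 2 := by
  rcases m with _ | k
  · simp
  · have h : (k + 1 + 1) * (k + 1) = (k + 1) * k + 2 * (k + 1) := by ring
    rw [h, Nat.add_mul_div_left _ _ (by norm_num)]
    simp

lemma devuelve_key (a : Int) (n : Nat) :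
    ((PySem.List.pyRange 0 (n : Int) 1).foldl
      (fun (st : Int × List Int) i =>
        let multiplo := st.1 + a * i
        (multiplo, st.2 ++ [multiplo]))
      (a, [])) =
    (a * (1 + ((n * (n - 1) / 2 : Nat) : Int)),
     (PySem.List.pyRange 0 (n : Int) 1).map
       (fun i => a * (1 + PySem.Int.floordiv (i * (i + 1)) 2))) := by
  induction n with
  | zero => simp [PySem.List.pyRange_one_eq_nil]
  | succ m ih =>
    have hsplit : PySem.List.pyRange 0 ((m + 1 : Nat) : Int) 1
        = PySem.List.pyRange 0 (m : Int) 1 ++ [(m : Int)] := by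
      have := PySem.List.pyRange_one_succ_right (a := 0) (b := (m : Int))
        (by exact_mod_cast Int.natCast_nonneg m)
      push_cast
      exact this
    rw [hsplit, List.foldl_append, List.map_append, ih]
    have hfd : PySem.Int.floordiv ((m : Int) * ((m : Int) + 1)) 2
        = ((m * (m + 1) / 2 : Nat) : Int) := by
      have hcast : ((m : Int) * ((m : Int) + 1)) = ((m * (m + 1) : Nat) : Int) := by
        push_cast; ring
      rw [hcast]
      exact_mod_cast PySem.Int.floordiv_natCast (m * (m + 1)) 2
    simp only [List.foldl_cons, List.foldl_nil, List.map_cons, List.map_nil, Prod.mk.injEq,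
      List.append_cancel_left_eq, List.cons.injEq, and_true, hfd, Nat.add_sub_cancel]
    have hcomm : m * (m + 1) = (m + 1) * m := by ring
    rw [hcomm, ← devuelve_tri m]
    constructor <;> (push_cast; ring)

-- ===== VERDICT (by name: the statement is the Claim_ definition above) =====
theorem devuelve_lista_spec : Claim_equal_devuelve_lista := by
  intro numero1 longitud _
  unfold Spec_devuelve_lista devuelve_lista devuelve_lista_alt
  by_cases h : longitud ≤ 0
  · simp [PySem.List.pyRange_one_eq_nil h]
  · have hl : longitud = ((longitud.toNat : Nat) : Int) := by omega
    rw [hl, devuelve_key]
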